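-- pv_equiv track=rewrite | github.com/hyukji/AlgorithmProblem | 5000/1464.py | orderOfDict
-- ===== SOURCE A (Python) =====
-- def orderOfDict(data):
--     if len(data) == 0:
--         return []
--
--     m = 'Z'
--     idx = 0
--     for i, alpha in enumerate(data):
--         if alpha <= m:
--             m = alpha
--             idx = i
--
--     return [m] + orderOfDict(data[:idx]) + data[idx+1:]
-- ===== SOURCE B (Python) =====
-- def orderOfDict(data):
--     n = len(data)
--     # one pass: lastmin[k] = (min, last argmin) of data[:k+1], capped at 'Z'
--     lastmin = []
--     m, idx = 'Z', 0
--     for i, alpha in enumerate(data):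
--         if alpha <= m:
--             m, idx = alpha, i
--         lastmin.append((m, idx))
--     # walk the min-chain, collecting the minima and the frozen suffix segments
--     mins = []
--     parts = []
--     k = n
--     while k > 0:
--         m, idx = lastmin[k - 1]
--         mins.append(m)
--         parts.append(data[idx + 1:k])
--         k = idx
--     parts.reverse()
--     return mins + [x for seg in parts for x in seg]
-- ===== Notes on version B (the rewrite author's own statement) =====
-- stated objective: alternative
-- what changed: Replaced the recursion that re-scans each prefix for its last capped minimum by a single pass that precomputes the (min,last-argmin) state of every prefix, then an iterative walk down the min-chain that collects the minima and the frozen suffix segments and concatenates the segments in reverse.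
import Mathlib
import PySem

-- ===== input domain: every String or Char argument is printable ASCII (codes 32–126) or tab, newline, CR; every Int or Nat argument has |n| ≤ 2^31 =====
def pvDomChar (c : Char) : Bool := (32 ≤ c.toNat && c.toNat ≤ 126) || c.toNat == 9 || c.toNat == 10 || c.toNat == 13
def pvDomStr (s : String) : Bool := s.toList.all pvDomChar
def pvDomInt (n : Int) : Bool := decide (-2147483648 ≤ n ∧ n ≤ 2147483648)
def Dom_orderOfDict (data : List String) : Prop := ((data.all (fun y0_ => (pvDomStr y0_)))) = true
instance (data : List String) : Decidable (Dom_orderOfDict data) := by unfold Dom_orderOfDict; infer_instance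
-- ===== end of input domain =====

-- B replaces A's recursive re-scan of every prefix by one precomputed prefix (min, last-argmin)
-- array and an iterative walk down the min-chain (an alternative, non-recursive algorithm).

-- ===== PORT A =====
-- A's `for i, alpha in enumerate(data)` loop: the enumerate counter is the second component.
def aStep (s : (String × Int) × Int) (alpha : String) : (String × Int) × Int :=
  ((if alpha ≤ s.1.1 then (alpha, s.2) else s.1), s.2 + 1)

def aLoop (data : List String) : (String × Int) × Int :=
  data.foldl aStep (("Z", 0), 0)

-- invariant of A's loop, cited by the port's decreasing_by: idx stays a valid index
theorem aStep_inv (l : List String) (st : (String × Int) × Int)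
    (h1 : 0 ≤ st.2) (h2 : 0 ≤ st.1.2) (h3 : st.1.2 ≤ max (st.2 - 1) 0) :
    0 ≤ (l.foldl aStep st).1.2 ∧
      (l.foldl aStep st).1.2 ≤ max ((l.foldl aStep st).2 - 1) 0 ∧
      (l.foldl aStep st).2 = st.2 + l.length := by
  induction l generalizing st with
  | nil => exact ⟨h2, h3, by simp⟩
  | cons x t ih =>
    have stepinv : 0 ≤ (aStep st x).2 ∧ 0 ≤ (aStep st x).1.2 ∧
        (aStep st x).1.2 ≤ max ((aStep st x).2 - 1) 0 := by
      simp only [aStep]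
      split <;> simp <;> omega
    have := ih (aStep st x) stepinv.1 stepinv.2.1 stepinv.2.2
    simp only [List.foldl_cons, List.length_cons]
    refine ⟨this.1, this.2.1, ?_⟩
    have hc : (aStep st x).2 = st.2 + 1 := rfl
    rw [this.2.2, hc]; push_cast; ring

theorem aLoop_idx_lt (data : List String) (h : data.length ≠ 0) :
    0 ≤ (aLoop data).1.2 ∧ (aLoop data).1.2.toNat < data.length := by
  have := aStep_inv data (("Z", 0), 0) (by simp) (by simp) (by simp)
  refine ⟨this.1, ?_⟩
  have h2 := this.2.1
  have h3 := this.2.2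
  simp only [aLoop] at *
  omega

def orderOfDict (data : List String) : List String :=
  if data.length = 0 then []
  else
    [(aLoop data).1.1]
      ++ orderOfDict (PySem.List.slice data none (some (aLoop data).1.2))
      ++ PySem.List.slice data (some ((aLoop data).1.2 + 1)) none
termination_by data.length
decreasing_by
  have hb := aLoop_idx_lt data (by assumption)
  rw [PySem.List.slice_to _ hb.1]
  simp only [List.length_take]
  omega

-- ===== PORT B =====
-- Source B's first loop: same running (m, idx) state plus the appended lastmin list.
def bScanStep (s : ((String × Int) × Int) × List (String × Int)) (alpha : String) :
    ((String × Int) × Int) × List (String × Int) :=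
  let mi := if alpha ≤ s.1.1.1 then (alpha, s.1.2) else s.1.1
  ((mi, s.1.2 + 1), s.2 ++ [mi])

-- Source B's while loop; fuel only makes the recursion total (data.length + 1 always suffices).
def bWalk (data : List String) (lastmin : List (String × Int)) :
    Nat → Nat → List String → List (List String) → List String × List (List String)
  | 0, _, mins, parts => (mins, parts)
  | fuel + 1, k, mins, parts =>
    if k = 0 then (mins, parts)
    else
      let p := lastmin.getD (k - 1) ("Z", 0)
      bWalk data lastmin fuel p.2.toNat (mins ++ [p.1])
        (parts ++ [PySem.List.slice data (some (p.2 + 1)) (some (k : Int))])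

def orderOfDict_alt (data : List String) : List String :=
  let lastmin := (data.foldl bScanStep ((("Z", 0), 0), [])).2
  let r := bWalk data lastmin (data.length + 1) data.length [] []
  r.1 ++ r.2.reverse.flatten

-- ===== PRECONDITION & SPEC =====
def Spec_orderOfDict (data : List String) (out : List String) : Prop := out = orderOfDict_alt data
instance (data : List String) (out : List String) : Decidable (Spec_orderOfDict data out) := by unfold Spec_orderOfDict; infer_instance

-- ===== CLAIM (what is proved, stated in full; the proofs are below) =====
def Claim_equal_orderOfDict : Prop := ∀ (data : List String), Dom_orderOfDict data → Spec_orderOfDict data (orderOfDict data)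

-- ===== LEMMAS AND PROOFS =====

-- B's scan list = per-prefix states of A's loop
theorem bScan_eq (l : List String) (st : (String × Int) × Int) (acc : List (String × Int)) :
    (l.foldl bScanStep (st, acc)).2
      = acc ++ (List.range l.length).map (fun j => ((l.take (j + 1)).foldl aStep st).1) := by
  induction l generalizing st acc with
  | nil => simp
  | cons x t ih =>
    have hstep : bScanStep (st, acc) x = (aStep st x, acc ++ [(aStep st x).1]) := by
      simp only [bScanStep, aStep]
    rw [List.foldl_cons, hstep, ih]
    simp only [List.length_cons, List.range_succ_eq_map, List.map_cons, List.map_map]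
    simp [Function.comp_def, List.append_assoc]

theorem lastmin_getD (data : List String) (k : Nat) (h1 : 1 ≤ k) (h2 : k ≤ data.length) :
    ((data.foldl bScanStep ((("Z", 0), 0), [])).2).getD (k - 1) ("Z", 0)
      = (aLoop (data.take k)).1 := by
  rw [bScan_eq]
  have hk : k - 1 < data.length := by omega
  have hkk : k - 1 + 1 = k := by omega
  rw [List.getD_eq_getElem?_getD]
  simp [hk, hkk, aLoop]

-- one step of A, with the slices resolved to take/drop
theorem orderOfDict_unfold (data : List String) (h : data.length ≠ 0) :
    orderOfDict data
      = (aLoop data).1.1 ::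
          (orderOfDict (data.take (aLoop data).1.2.toNat)
            ++ data.drop ((aLoop data).1.2.toNat + 1)) := by
  have hb := aLoop_idx_lt data h
  conv_lhs => rw [orderOfDict]
  rw [if_neg h, PySem.List.slice_to _ hb.1, PySem.List.slice_from _ (by omega)]
  have h1 : ((aLoop data).1.2 + 1).toNat = (aLoop data).1.2.toNat + 1 := by omega
  rw [h1]
  simp

theorem seg_eq (data : List String) (k : Nat) (idx : Int) (h0 : 0 ≤ idx)
    (_hk : idx.toNat < k) :
    PySem.List.slice data (some (idx + 1)) (some (k : Int))
      = (data.take k).drop (idx.toNat + 1) := by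
  have h1 : (idx + 1).toNat = idx.toNat + 1 := by omega
  rw [PySem.List.slice_toNat _ (by omega) (by omega), h1, List.drop_take]
  simp

theorem walk_spec (data : List String) (fuel : Nat) :
    ∀ (k : Nat) (mins : List String) (parts : List (List String)),
      k ≤ data.length → k ≤ fuel →
      (bWalk data (data.foldl bScanStep ((("Z", 0), 0), [])).2 fuel k mins parts).1
        ++ (bWalk data (data.foldl bScanStep ((("Z", 0), 0), [])).2 fuel k mins parts).2.reverse.flatten
      = mins ++ orderOfDict (data.take k) ++ parts.reverse.flatten := by
  induction fuel with
  | zero =>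
    intro k mins parts hkn hkf
    have : k = 0 := by omega
    subst this
    simp [bWalk, orderOfDict]
  | succ fuel ih =>
    intro k mins parts hkn hkf
    by_cases hk0 : k = 0
    · subst hk0
      simp [bWalk, orderOfDict]
    · have h1 : 1 ≤ k := by omega
      have hlen : (data.take k).length = k := by simp; omega
      have hne : (data.take k).length ≠ 0 := by omega
      have hb := aLoop_idx_lt (data.take k) hne
      have hidx : (aLoop (data.take k)).1.2.toNat < k := by omega
      rw [bWalk, if_neg hk0]
      simp only [lastmin_getD data k h1 hkn]
      rw [ih _ _ _ (by omega) (by omega)]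
      rw [seg_eq data k _ hb.1 hidx]
      rw [orderOfDict_unfold (data.take k) hne]
      rw [List.take_take, min_eq_left (by omega : (aLoop (data.take k)).1.2.toNat ≤ k)]
      simp [List.append_assoc]

-- ===== VERDICT (by name: the statement is the Claim_ definition above) =====
theorem orderOfDict_spec : Claim_equal_orderOfDict := by
  intro data _
  unfold Spec_orderOfDict orderOfDict_alt
  have h := walk_spec data (data.length + 1) data.length [] []
    (le_refl _) (by omega)
  simp only [List.take_length] at h
  simp only [List.reverse_nil, List.flatten_nil, List.append_nil, List.nil_append] at h
  exact h.symm
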